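-- pv_equiv track=rewrite | github.com/KDhanak/qaoa_maxcut | tests/test_classical_maxcut.py | brute_force_max_cut
-- ===== SOURCE A (Python) =====
-- import itertools
--
-- def cut_value(bits, edges):
--     return sum(int(bits[u] != bits[v]) for u, v in edges)
--
-- def brute_force_max_cut(num_nodes, edges):
--     best_value = -1
--     best_assignments = []
--     for bits in itertools.product([0, 1], repeat=num_nodes):
--         value = cut_value(bits, edges)
--         if value > best_value:
--             best_value = value
--             best_assignments = [bits]
--         elif value == best_value:
--             best_assignments.append(bits)
--     return best_value, best_assignments
-- ===== SOURCE B (Python) =====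
-- def brute_force_max_cut(num_nodes, edges):
--     # Divide and conquer over the node index: decide each node's side recursively
--     # (0-branch first, then 1-branch) and combine subresults with an associative
--     # "max with tie-concatenation" merge; no itertools, no running-best loop.
--     def cut(bits):
--         c = 0
--         for u, v in edges:
--             if bits[u] != bits[v]:
--                 c += 1
--         return c
--
--     def merge(l, r):
--         if r[0] > l[0]:
--             return r
--         if r[0] == l[0]:
--             return (l[0], l[1] + r[1])
--         return l
--
--     def solve(prefix, k):
--         if k == 0:
--             return (cut(prefix), [tuple(prefix)])
--         return merge(solve(prefix + [0], k - 1), solve(prefix + [1], k - 1))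
--
--     return solve([], num_nodes)
-- ===== Notes on version B (the rewrite author's own statement) =====
-- stated objective: alternative
-- what changed: Replaces A's iterative running-best loop over itertools.product by a divide-and-conquer recursion over the node index that combines the two half-space subresults with an associative max-with-tie-concatenation merge.
import Mathlib
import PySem

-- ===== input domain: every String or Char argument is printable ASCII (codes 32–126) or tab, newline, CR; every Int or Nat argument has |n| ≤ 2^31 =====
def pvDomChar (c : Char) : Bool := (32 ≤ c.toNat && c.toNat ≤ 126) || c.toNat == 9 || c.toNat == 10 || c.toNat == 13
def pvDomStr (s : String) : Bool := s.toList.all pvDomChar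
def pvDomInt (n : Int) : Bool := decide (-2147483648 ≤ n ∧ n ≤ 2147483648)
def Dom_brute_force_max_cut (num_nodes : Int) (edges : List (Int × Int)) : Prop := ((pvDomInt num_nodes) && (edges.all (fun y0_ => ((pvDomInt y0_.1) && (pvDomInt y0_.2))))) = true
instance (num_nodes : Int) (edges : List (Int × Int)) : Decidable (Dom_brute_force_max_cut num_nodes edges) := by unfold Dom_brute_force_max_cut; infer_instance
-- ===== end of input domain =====

-- B replaces A's running-best loop over itertools.product by a divide-and-conquer
-- recursion over the node index with an associative merge; objective: alternative.

-- ===== PORT A =====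
-- itertools.product([0, 1], repeat=n)
def pvProd : Nat → List (List Int)
  | 0 => [[]]
  | n + 1 => ((pvProd n).map (fun r => 0 :: r)) ++ ((pvProd n).map (fun r => 1 :: r))

-- cut_value(bits, edges): sum(int(bits[u] != bits[v]) for u, v in edges); exact inside Pre_ (indices in range)
def cutA (bits : List Int) (edges : List (Int × Int)) : Int :=
  edges.foldl (fun s e =>
    s + (if PySem.List.pyGetD bits e.1 0 ≠ PySem.List.pyGetD bits e.2 0 then 1 else 0)) 0

def brute_force_max_cut (num_nodes : Int) (edges : List (Int × Int)) : Int × List (List Int) :=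
  (pvProd num_nodes.toNat).foldl (fun s bits =>
    let value := cutA bits edges
    if value > s.1 then (value, [bits])
    else if value = s.1 then (s.1, s.2 ++ [bits])
    else s) (-1, [])

-- ===== PORT B =====
-- cut(bits): explicit counting loop; exact inside Pre_ (indices in range)
def cutB (bits : List Int) (edges : List (Int × Int)) : Int :=
  edges.foldl (fun c e =>
    if PySem.List.pyGetD bits e.1 0 ≠ PySem.List.pyGetD bits e.2 0 then c + 1 else c) 0

-- merge(l, r)
def mergeB (l r : Int × List (List Int)) : Int × List (List Int) :=
  if r.1 > l.1 then r else if r.1 = l.1 then (l.1, l.2 ++ r.2) else l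

-- solve(prefix, k)
def solveB (edges : List (Int × Int)) (pfx : List Int) : Nat → Int × List (List Int)
  | 0 => (cutB pfx edges, [pfx])
  | k + 1 => mergeB (solveB edges (pfx ++ [0]) k) (solveB edges (pfx ++ [1]) k)

def brute_force_max_cut_alt (num_nodes : Int) (edges : List (Int × Int)) : Int × List (List Int) :=
  solveB edges [] num_nodes.toNat

-- ===== PRECONDITION & SPEC =====
-- Pre_ excludes exactly the inputs where A raises: num_nodes < 0 (ValueError from
-- itertools.product) and edge endpoints outside Python index range for a length-num_nodes
-- tuple (IndexError in cut_value).
def Pre_brute_force_max_cut (num_nodes : Int) (edges : List (Int × Int)) : Prop :=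
  0 ≤ num_nodes ∧ ∀ e ∈ edges,
    PySem.Raise.InRange num_nodes.toNat e.1 ∧ PySem.Raise.InRange num_nodes.toNat e.2
instance (num_nodes : Int) (edges : List (Int × Int)) : Decidable (Pre_brute_force_max_cut num_nodes edges) := by unfold Pre_brute_force_max_cut; infer_instance
def pvWitness_brute_force_max_cut : Int × (List (Int × Int)) := (3, [(0, 1), (1, 2), (0, 2)])

def Spec_brute_force_max_cut (num_nodes : Int) (edges : List (Int × Int)) (out : Int × List (List Int)) : Prop := out = brute_force_max_cut_alt num_nodes edges
instance (num_nodes : Int) (edges : List (Int × Int)) (out : Int × List (List Int)) : Decidable (Spec_brute_force_max_cut num_nodes edges out) := by unfold Spec_brute_force_max_cut; infer_instance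

-- ===== CLAIM (what is proved, stated in full; the proofs are below) =====
def Claim_equal_brute_force_max_cut : Prop := ∀ (num_nodes : Int) (edges : List (Int × Int)), Dom_brute_force_max_cut num_nodes edges → Pre_brute_force_max_cut num_nodes edges → Spec_brute_force_max_cut num_nodes edges (brute_force_max_cut num_nodes edges)

-- ===== LEMMAS AND PROOFS =====

-- the two cut-value folds compute the same number
theorem cutA_eq_cutB (bits : List Int) (edges : List (Int × Int)) :
    cutA bits edges = cutB bits edges := by
  unfold cutA cutB
  congr 1
  funext s e
  split <;> omega

-- cut values are nonnegative
theorem cutB_nonneg (bits : List Int) (edges : List (Int × Int)) : 0 ≤ cutB bits edges := by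
  unfold cutB
  suffices h : ∀ (l : List (Int × Int)) (s : Int), 0 ≤ s →
      0 ≤ l.foldl (fun c e =>
        if PySem.List.pyGetD bits e.1 0 ≠ PySem.List.pyGetD bits e.2 0 then c + 1 else c) s by
    exact h edges 0 le_rfl
  intro l
  induction l with
  | nil => intro s hs; simpa using hs
  | cons e t ih =>
    intro s hs
    simp only [List.foldl_cons]
    split <;> [exact ih _ (by omega); exact ih _ hs]

theorem pvProd_ne_nil (n : Nat) : pvProd n ≠ [] := by
  induction n with
  | zero => simp [pvProd]
  | succ n ih =>
    intro h
    simp only [pvProd, List.append_eq_nil_iff, List.map_eq_nil_iff] at h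
    exact ih h.1

-- the merge is associative
theorem mergeB_assoc (a b c : Int × List (List Int)) :
    mergeB (mergeB a b) c = mergeB a (mergeB b c) := by
  obtain ⟨m1, f1⟩ := a; obtain ⟨m2, f2⟩ := b; obtain ⟨m3, f3⟩ := c
  unfold mergeB
  simp only []
  split_ifs <;> simp_all [List.append_assoc] <;> omega

-- fold of merge with a shifted seed
theorem foldl_merge_shift (s a : Int × List (List Int)) (l : List (Int × List (List Int))) :
    l.foldl mergeB (mergeB s a) = mergeB s (l.foldl mergeB a) := by
  induction l generalizing a with
  | nil => rfl
  | cons x t ih =>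
    simp only [List.foldl_cons]
    rw [mergeB_assoc, ih]

-- reduce a nonempty list of (value, assignments) pairs by merge
def redM : List (Int × List (List Int)) → Int × List (List Int)
  | [] => (-1, [])
  | a :: t => t.foldl mergeB a

theorem redM_append (l1 l2 : List (Int × List (List Int))) (h1 : l1 ≠ []) (h2 : l2 ≠ []) :
    redM (l1 ++ l2) = mergeB (redM l1) (redM l2) := by
  obtain ⟨a, t1, rfl⟩ := List.exists_cons_of_ne_nil h1
  obtain ⟨b, t2, rfl⟩ := List.exists_cons_of_ne_nil h2
  simp only [redM, List.cons_append, List.foldl_append, List.foldl_cons]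
  rw [← foldl_merge_shift]

-- B's recursion equals the merge-reduction of the leaf list in enumeration order
theorem solveB_eq_redM (edges : List (Int × Int)) :
    ∀ (k : Nat) (p : List Int),
      solveB edges p k = redM ((pvProd k).map (fun r => (cutB (p ++ r) edges, [p ++ r]))) := by
  intro k
  induction k with
  | zero => intro p; simp [solveB, pvProd, redM]
  | succ k ih =>
    intro p
    have hne : ∀ f : List Int → Int × List (List Int), (pvProd k).map f ≠ [] := by
      intro f h
      exact pvProd_ne_nil k (List.map_eq_nil_iff.mp h)
    simp only [solveB, pvProd, List.map_append, List.map_map]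
    rw [redM_append _ _ (hne _) (hne _), ih (p ++ [0]), ih (p ++ [1])]
    congr 2 <;> · apply List.map_congr_left; intro r _; simp

-- A's loop step is exactly merging with a singleton leaf
theorem foldA_eq_foldl_merge (edges : List (Int × Int)) (l : List (List Int))
    (s : Int × List (List Int)) :
    l.foldl (fun s bits =>
      let value := cutA bits edges
      if value > s.1 then (value, [bits])
      else if value = s.1 then (s.1, s.2 ++ [bits])
      else s) s
    = (l.map (fun x => (cutB x edges, [x]))).foldl mergeB s := by
  rw [List.foldl_map]
  congr 1
  funext acc x
  simp only [cutA_eq_cutB, mergeB]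

-- ===== VERDICT (by name: the statement is the Claim_ definition above) =====
theorem brute_force_max_cut_spec : Claim_equal_brute_force_max_cut := by
  intro num_nodes edges _ _
  show _ = _
  unfold brute_force_max_cut brute_force_max_cut_alt
  rw [foldA_eq_foldl_merge, solveB_eq_redM]
  obtain ⟨x, t, hxt⟩ : ∃ x t, pvProd num_nodes.toNat = x :: t := by
    cases h : pvProd num_nodes.toNat with
    | nil => exact absurd h (pvProd_ne_nil _)
    | cons x t => exact ⟨x, t, rfl⟩
  rw [hxt]
  simp only [List.nil_append, List.map_cons, List.foldl_cons, redM]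
  have h0 : 0 ≤ cutB x edges := cutB_nonneg x edges
  have : mergeB (-1, ([] : List (List Int))) (cutB x edges, [x]) = (cutB x edges, [x]) := by
    unfold mergeB
    rw [if_pos (by simpa using by omega : (cutB x edges, [x]).1 > ((-1 : Int), ([] : List (List Int))).1)]
  rw [this]
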